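-- pv_equiv track=rewrite | github.com/Igor-Polatajko/python-labs | lab_5_2.py | can_fit_box_through_door
-- ===== SOURCE A (Python) =====
-- def can_fit_box_through_door(door_size, box_size):
--     for one_side in box_size.keys():
--         for another_side in box_size.keys():
--             if one_side is another_side:
--                 continue
--             if box_size[one_side] < door_size["height"] and box_size[another_side] < door_size["width"] or \
--                     box_size[one_side] < door_size["width"] and box_size[another_side] < door_size["height"]:
--                 return True
--     return False
-- ===== SOURCE B (Python) =====
-- def can_fit_box_through_door(door_size, box_size):
--     if len(box_size) < 2:
--         return False
--     s1, s2 = sorted(box_size.values())[:2]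
--     lo = min(door_size["height"], door_size["width"])
--     hi = max(door_size["height"], door_size["width"])
--     return s1 < lo and s2 < hi
-- ===== Notes on version B (the rewrite author's own statement) =====
-- stated objective: simpler
-- what changed: Replaces the quadratic scan over all ordered pairs of box dimensions by selecting the two smallest box dimensions via a sort and comparing them once against min/max of the door dimensions.
import Mathlib
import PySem

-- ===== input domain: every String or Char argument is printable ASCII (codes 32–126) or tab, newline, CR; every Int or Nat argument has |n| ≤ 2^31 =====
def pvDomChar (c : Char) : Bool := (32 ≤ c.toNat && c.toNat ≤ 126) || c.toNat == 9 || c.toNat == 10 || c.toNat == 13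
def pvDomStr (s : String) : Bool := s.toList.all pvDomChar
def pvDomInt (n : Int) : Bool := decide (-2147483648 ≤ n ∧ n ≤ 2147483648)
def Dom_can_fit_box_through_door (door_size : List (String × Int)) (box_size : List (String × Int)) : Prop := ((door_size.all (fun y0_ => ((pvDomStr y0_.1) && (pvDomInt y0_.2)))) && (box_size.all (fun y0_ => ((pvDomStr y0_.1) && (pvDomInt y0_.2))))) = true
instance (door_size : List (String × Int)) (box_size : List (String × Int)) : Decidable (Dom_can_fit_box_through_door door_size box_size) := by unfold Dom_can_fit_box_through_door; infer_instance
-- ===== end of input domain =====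

-- B replaces A's scan over all ordered pairs of box dimensions by: take the two
-- smallest box dimensions (sort) and compare them to min/max of the door sides.
-- Objective: simpler. Equivalence is proved on all inputs where A returns (Pre_).

-- ===== PORT A =====
def can_fit_box_through_door (door_size : List (String × Int)) (box_size : List (String × Int)) : Bool :=
  let door := PySem.Dict.ofList door_size
  let box := PySem.Dict.ofList box_size
  box.keys.any (fun one_side =>
    box.keys.any (fun another_side =>
      if one_side == another_side then false
      else
        (decide (box.getD one_side 0 < door.getD "height" 0) &&
         decide (box.getD another_side 0 < door.getD "width" 0)) ||
        (decide (box.getD one_side 0 < door.getD "width" 0) &&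
         decide (box.getD another_side 0 < door.getD "height" 0))))

-- ===== PORT B =====
def can_fit_box_through_door_alt (door_size : List (String × Int)) (box_size : List (String × Int)) : Bool :=
  let box := PySem.Dict.ofList box_size
  if box.size < 2 then false
  else
    let door := PySem.Dict.ofList door_size
    match (PySem.List.sorted box.values (fun v => v) false).take 2 with
    | [s1, s2] =>
      let lo := min (door.getD "height" 0) (door.getD "width" 0)
      let hi := max (door.getD "height" 0) (door.getD "width" 0)
      decide (s1 < lo) && decide (s2 < hi)
    | _ => false

-- ===== PRECONDITION & SPEC =====
-- Pre_ excludes exactly the inputs where A raises KeyError: box has ≥ 2 (distinct)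
-- dimensions but door_size lacks key "height" or "width".
def Pre_can_fit_box_through_door (door_size : List (String × Int)) (box_size : List (String × Int)) : Prop :=
  (PySem.Dict.ofList box_size).size ≤ 1 ∨
    ("height" ∈ door_size.map Prod.fst ∧ "width" ∈ door_size.map Prod.fst)
instance (door_size : List (String × Int)) (box_size : List (String × Int)) : Decidable (Pre_can_fit_box_through_door door_size box_size) := by unfold Pre_can_fit_box_through_door; infer_instance

def pvWitness_can_fit_box_through_door : (List (String × Int)) × (List (String × Int)) :=
  ([("height", 5), ("width", 4)], [("a", 1), ("b", 2)])

def Spec_can_fit_box_through_door (door_size : List (String × Int)) (box_size : List (String × Int)) (out : Bool) : Prop := out = can_fit_box_through_door_alt door_size box_size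
instance (door_size : List (String × Int)) (box_size : List (String × Int)) (out : Bool) : Decidable (Spec_can_fit_box_through_door door_size box_size out) := by unfold Spec_can_fit_box_through_door; infer_instance

-- ===== CLAIM (what is proved, stated in full; the proofs are below) =====
def Claim_equal_can_fit_box_through_door : Prop := ∀ (door_size : List (String × Int)) (box_size : List (String × Int)), Dom_can_fit_box_through_door door_size box_size → Pre_can_fit_box_through_door door_size box_size → Spec_can_fit_box_through_door door_size box_size (can_fit_box_through_door door_size box_size)

-- ===== LEMMAS AND PROOFS =====

-- From a permutation (a :: b :: l) ~ ks.map f with ks nodup, recover two DISTINCT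
-- keys mapping to a and b.
theorem pv_extract_two {α β : Type} [DecidableEq α] (f : α → β) (ks : List α) (a b : β)
    (l : List β) (hnd : ks.Nodup) (hp : (a :: b :: l).Perm (ks.map f)) :
    ∃ k1 ∈ ks, ∃ k2 ∈ ks, k1 ≠ k2 ∧ f k1 = a ∧ f k2 = b := by
  have ha : a ∈ ks.map f := hp.mem_iff.mp (by simp)
  obtain ⟨k1, hk1, hfk1⟩ := List.mem_map.mp ha
  obtain ⟨u, v, rfl⟩ := List.mem_iff_append.mp hk1
  have hmap : (u ++ k1 :: v).map f = u.map f ++ f k1 :: v.map f := by simp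
  have hp2 : (a :: b :: l).Perm (a :: (u.map f ++ v.map f)) :=
    hp.trans (by rw [hmap, hfk1]; exact List.perm_middle)
  have hbl : (b :: l).Perm (u.map f ++ v.map f) := hp2.cons_inv
  have hb : b ∈ u.map f ++ v.map f := hbl.mem_iff.mp (by simp)
  have hb' : b ∈ (u ++ v).map f := by rw [List.map_append]; exact hb
  obtain ⟨k2, hk2, hfk2⟩ := List.mem_map.mp hb'
  have hk1ne : k1 ∉ u ++ v := by
    have := hnd
    rw [List.nodup_append] at this
    rcases this with ⟨hu, hkv, hdisj⟩
    rw [List.nodup_cons] at hkv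
    intro hmem
    rcases List.mem_append.mp hmem with h | h
    · exact hdisj k1 h k1 List.mem_cons_self rfl
    · exact hkv.1 h
  refine ⟨k1, hk1, k2, ?_, ?_, hfk1, hfk2⟩
  · rcases List.mem_append.mp hk2 with h | h
    · exact List.mem_append.mpr (Or.inl h)
    · exact List.mem_append.mpr (Or.inr (List.mem_cons_of_mem _ h))
  · intro h; exact hk1ne (h ▸ hk2)

-- From a nodup list with two distinct members, peel them off as a permutation.
theorem pv_perm_two {α : Type} [DecidableEq α] (ks : List α) (k1 k2 : α)
    (h1 : k1 ∈ ks) (h2 : k2 ∈ ks) (hne : k1 ≠ k2) :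
    ∃ t, ks.Perm (k1 :: k2 :: t) := by
  have p1 : ks.Perm (k1 :: ks.erase k1) := List.perm_cons_erase h1
  have h2' : k2 ∈ ks.erase k1 := (List.mem_erase_of_ne (Ne.symm hne)).mpr h2
  have p2 : (ks.erase k1).Perm (k2 :: (ks.erase k1).erase k2) := List.perm_cons_erase h2'
  exact ⟨(ks.erase k1).erase k2, p1.trans (p2.cons k1)⟩

-- In a sorted list s1 :: s2 :: t that is a permutation of a :: b :: l,
-- s1 ≤ min a b and s2 ≤ max a b.
theorem pv_sorted_two_le (s1 s2 a b : Int) (t l : List Int)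
    (hpw : (s1 :: s2 :: t).Pairwise (· ≤ ·))
    (hp : (s1 :: s2 :: t).Perm (a :: b :: l)) :
    s1 ≤ min a b ∧ s2 ≤ max a b := by
  have hmema : a ∈ s1 :: s2 :: t := hp.mem_iff.mpr (by simp)
  have hmemb : b ∈ s1 :: s2 :: t := hp.mem_iff.mpr (by simp)
  have hle : ∀ x ∈ s1 :: s2 :: t, s1 ≤ x := by
    intro x hx
    rcases List.mem_cons.mp hx with rfl | hx2
    · exact le_refl _
    · exact List.rel_of_pairwise_cons hpw hx2
  have hs1 : s1 ≤ min a b := le_min (hle a hmema) (hle b hmemb)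
  refine ⟨hs1, ?_⟩
  by_contra hgt
  rw [not_le] at hgt
  have hab : a < s2 ∧ b < s2 := by
    constructor <;> [exact lt_of_le_of_lt (le_max_left a b) hgt;
                    exact lt_of_le_of_lt (le_max_right a b) hgt]
  have hcnt := hp.countP_eq (fun x => decide (x < s2))
  have ht : ∀ x ∈ t, s2 ≤ x := by
    intro x hx
    exact List.rel_of_pairwise_cons (List.pairwise_cons.mp hpw).2 hx
  have h0 : (s2 :: t).countP (fun x => decide (x < s2)) = 0 := by
    rw [List.countP_eq_zero]
    intro x hx
    rcases List.mem_cons.mp hx with rfl | hx2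
    · simp
    · simpa using not_lt.mpr (ht x hx2)
  have hL : (s1 :: s2 :: t).countP (fun x => decide (x < s2)) ≤ 1 := by
    rw [List.countP_cons, h0]
    split <;> omega
  have hR : 2 ≤ (a :: b :: l).countP (fun x => decide (x < s2)) := by
    have h1 : decide (a < s2) = true := decide_eq_true hab.1
    have h2 : decide (b < s2) = true := decide_eq_true hab.2
    simp only [List.countP_cons, h1, h2, if_true]
    omega
  omega

-- Characterisation of A as an existential over distinct keys (one symmetric clause).
theorem pv_A_iff (door_size box_size : List (String × Int)) :
    can_fit_box_through_door door_size box_size = true ↔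
      ∃ k1 ∈ (PySem.Dict.ofList box_size).keys, ∃ k2 ∈ (PySem.Dict.ofList box_size).keys,
        k1 ≠ k2 ∧
        (PySem.Dict.ofList box_size).getD k1 0 < (PySem.Dict.ofList door_size).getD "height" 0 ∧
        (PySem.Dict.ofList box_size).getD k2 0 < (PySem.Dict.ofList door_size).getD "width" 0 := by
  unfold can_fit_box_through_door
  simp only [List.any_eq_true]
  constructor
  · rintro ⟨i, hi, j, hj, hcond⟩
    by_cases hij : (i == j) = true
    · rw [if_pos hij] at hcond
      exact absurd hcond (by simp)
    · rw [if_neg hij] at hcond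
      have hne : i ≠ j := by simpa using hij
      simp only [Bool.or_eq_true, Bool.and_eq_true, decide_eq_true_eq] at hcond
      rcases hcond with ⟨h1, h2⟩ | ⟨h1, h2⟩
      · exact ⟨i, hi, j, hj, hne, h1, h2⟩
      · exact ⟨j, hj, i, hi, hne.symm, h2, h1⟩
  · rintro ⟨k1, h1, k2, h2, hne, hh, hw⟩
    refine ⟨k1, h1, k2, h2, ?_⟩
    rw [if_neg (by simpa using hne)]
    simp [hh, hw]

theorem pv_main (door_size box_size : List (String × Int)) :
    can_fit_box_through_door door_size box_size = can_fit_box_through_door_alt door_size box_size := by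
  set box := PySem.Dict.ofList box_size with hbox
  set door := PySem.Dict.ofList door_size with hdoor
  set f : String → Int := fun k => box.getD k 0 with hf
  have hnd : box.keys.Nodup := PySem.Dict.nodup_keys_ofList box_size
  have hvals : box.values = box.keys.map f := PySem.Dict.values_eq_map_keys box hnd 0
  set h := door.getD "height" 0 with hh
  set w := door.getD "width" 0 with hw
  by_cases hsz : box.size < 2
  · -- few keys: A has no distinct pair, B returns false by its guard
    have hB : can_fit_box_through_door_alt door_size box_size = false := by
      unfold can_fit_box_through_door_alt
      rw [← hbox, if_pos hsz]
    rw [hB]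
    rw [Bool.eq_false_iff]
    intro hA
    obtain ⟨k1, h1, k2, h2, hne, -, -⟩ := (pv_A_iff door_size box_size).mp hA
    have hlen : box.keys.length = box.size := by
      simp [PySem.Dict.keys, PySem.Dict.size]
    have hlen1 : box.keys.length ≤ 1 := by omega
    -- a list of length ≤ 1 cannot contain two distinct members
    refine hne ?_
    cases hk : box.keys with
    | nil => rw [hk] at h1; simp at h1
    | cons x xs =>
      cases xs with
      | nil =>
        rw [hk] at h1 h2
        simp at h1 h2
        rw [h1, h2]
      | cons y ys =>
        rw [hk] at hlen1
        simp at hlen1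
  · -- size ≥ 2
    have hlenv : (PySem.List.sorted box.values (fun v => v) false).length = box.size := by
      rw [PySem.List.length_sorted]
      simp [PySem.Dict.values, PySem.Dict.size]
    rcases hsrt : PySem.List.sorted box.values (fun v => v) false with _ | ⟨s1, _ | ⟨s2, rest⟩⟩
    · rw [hsrt] at hlenv; simp at hlenv; omega
    · rw [hsrt] at hlenv; simp at hlenv; omega
    · have hB : can_fit_box_through_door_alt door_size box_size =
          (decide (s1 < min h w) && decide (s2 < max h w)) := by
        unfold can_fit_box_through_door_alt
        rw [← hbox, if_neg hsz, ← hdoor, hsrt]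
        simp [← hh, ← hw]
      rw [hB, Bool.eq_iff_iff, Bool.and_eq_true, decide_eq_true_eq, decide_eq_true_eq]
      have hperm : (s1 :: s2 :: rest).Perm (box.keys.map f) := by
        rw [← hvals, ← hsrt]
        exact PySem.List.sorted_perm box.values (fun v => v) false
      have hpw : (s1 :: s2 :: rest).Pairwise (· ≤ ·) := by
        have := PySem.List.sorted_pairwise box.values (fun v => v)
        rw [hsrt] at this
        exact this
      rw [pv_A_iff door_size box_size]
      rw [← hbox, ← hdoor, ← hh, ← hw]
      constructor
      · rintro ⟨k1, h1, k2, h2, hne, hkh, hkw⟩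
        obtain ⟨t, hpt⟩ := pv_perm_two box.keys k1 k2 h1 h2 hne
        have hp2 : (s1 :: s2 :: rest).Perm (f k1 :: f k2 :: t.map f) := by
          refine hperm.trans ?_
          simpa using (hpt.map f)
        obtain ⟨hs1, hs2⟩ := pv_sorted_two_le s1 s2 (f k1) (f k2) rest (t.map f) hpw hp2
        have h1' : s1 < min h w := by
          have hm : min (f k1) (f k2) < min h w :=
            lt_min (lt_of_le_of_lt (min_le_left _ _) hkh) (lt_of_le_of_lt (min_le_right _ _) hkw)
          exact lt_of_le_of_lt hs1 hm
        have h2' : s2 < max h w := by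
          have hm : max (f k1) (f k2) < max h w := by
            rcases max_choice (f k1) (f k2) with hm | hm <;> rw [hm]
            · exact lt_of_lt_of_le hkh (le_max_left _ _)
            · exact lt_of_lt_of_le hkw (le_max_right _ _)
          exact lt_of_le_of_lt hs2 hm
        exact ⟨h1', h2'⟩
      · rintro ⟨hlo, hhi⟩
        obtain ⟨k1, h1, k2, h2, hne, hfk1, hfk2⟩ :=
          pv_extract_two f box.keys s1 s2 rest hnd hperm
        rcases le_total w h with hwh | hhw
        · -- max = h: take s2 against height, s1 against width
          have hm : max h w = h := max_eq_left hwh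
          have hmn : min h w = w := min_eq_right hwh
          refine ⟨k2, h2, k1, h1, hne.symm, ?_, ?_⟩
          · show f k2 < h; rw [hfk2]; rw [hm] at hhi; exact hhi
          · show f k1 < w; rw [hfk1]; rw [hmn] at hlo; exact hlo
        · have hm : max h w = w := max_eq_right hhw
          have hmn : min h w = h := min_eq_left hhw
          refine ⟨k1, h1, k2, h2, hne, ?_, ?_⟩
          · show f k1 < h; rw [hfk1]; rw [hmn] at hlo; exact hlo
          · show f k2 < w; rw [hfk2]; rw [hm] at hhi; exact hhi

-- ===== VERDICT (by name: the statement is the Claim_ definition above) =====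
theorem can_fit_box_through_door_spec : Claim_equal_can_fit_box_through_door := by
  intro door_size box_size _ _
  unfold Spec_can_fit_box_through_door
  exact pv_main door_size box_size
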